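-- pv_equiv track=rewrite | github.com/dldbdud314/PS | programmers/방문길이.py | solution
-- ===== SOURCE A (Python) =====
-- def move(d):
--     return {'U' : (1, 0), 'D' : (-1, 0), 'R' : (0, 1), 'L' : (0, -1)}.get(d)
--
-- def solution(dirs):
--     cur_pos = (0, 0)
--     visited = set()
--     path = 0
--     for dir in dirs:
--         cx, cy = cur_pos
--         dx, dy = move(dir)
--         if -5 <= cx + dx <= 5 and -5 <= cy + dy <= 5:
--             if ((cx, cy), (cx + dx, cy + dy)) not in visited:
--                 visited.add(((cx, cy), (cx + dx, cy + dy)))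
--                 visited.add(((cx + dx, cy + dy), (cx, cy)))
--                 path += 1
--             cur_pos = (cx + dx, cy + dy)
--
--     return path
-- ===== SOURCE B (Python) =====
-- def solution(dirs):
--     delta = {'U': (1, 0), 'D': (-1, 0), 'R': (0, 1), 'L': (0, -1)}
--     cur = (0, 0)
--     pts = [cur]
--     for d in dirs:
--         dx, dy = delta[d]
--         nxt = (cur[0] + dx, cur[1] + dy)
--         if -5 <= nxt[0] <= 5 and -5 <= nxt[1] <= 5:
--             pts.append(nxt)
--             cur = nxt
--     edges = {tuple(sorted(e)) for e in zip(pts, pts[1:])}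
--     return len(edges)
-- ===== Notes on version B (the rewrite author's own statement) =====
-- stated objective: simpler
-- what changed: B replaces A's running counter plus double insertion of both directed orientations into a visited-set by a two-pass decomposition: first build the list of visited grid points, then count the set of canonically ordered undirected edges between consecutive points.
-- outside the precondition, e.g. on solution('X'): A raises TypeError, B raises KeyError
import Mathlib
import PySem

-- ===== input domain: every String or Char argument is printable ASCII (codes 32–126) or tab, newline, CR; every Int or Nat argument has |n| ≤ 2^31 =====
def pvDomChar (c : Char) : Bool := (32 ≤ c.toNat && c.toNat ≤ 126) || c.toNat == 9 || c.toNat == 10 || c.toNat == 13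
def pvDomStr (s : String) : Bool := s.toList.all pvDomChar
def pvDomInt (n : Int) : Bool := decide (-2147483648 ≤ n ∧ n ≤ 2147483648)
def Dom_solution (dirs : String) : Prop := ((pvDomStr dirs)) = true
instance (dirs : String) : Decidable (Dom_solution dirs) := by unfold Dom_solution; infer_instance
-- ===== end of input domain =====

-- B replaces A's counter-plus-double-directed-edge-set loop by a two-pass decomposition:
-- build the list of visited points, then count the set of canonical undirected edges (objective: simpler).

-- ===== PORT A =====
-- move(d): dict .get, none = key absent (Python then raises TypeError on unpacking; excluded by Pre_)
def moveA (d : Char) : Option (Int × Int) :=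
  PySem.Dict.get? (PySem.Dict.ofList [('U', ((1:Int), (0:Int))), ('D', (-1, 0)), ('R', (0, 1)), ('L', (0, -1))]) d

def solAStep (st : (Int × Int) × PySem.Set ((Int × Int) × (Int × Int)) × Int) (d : Char) :
    (Int × Int) × PySem.Set ((Int × Int) × (Int × Int)) × Int :=
  match moveA d with
  | none => st  -- Python raises TypeError here (unpacking None); such inputs are outside Pre_solution
  | some (dx, dy) =>
    let cx := st.1.1; let cy := st.1.2
    if -5 ≤ cx + dx ∧ cx + dx ≤ 5 ∧ -5 ≤ cy + dy ∧ cy + dy ≤ 5 then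
      if ((cx, cy), (cx + dx, cy + dy)) ∈ st.2.1 then
        ((cx + dx, cy + dy), st.2.1, st.2.2)
      else
        ((cx + dx, cy + dy), (st.2.1.add ((cx, cy), (cx + dx, cy + dy))).add ((cx + dx, cy + dy), (cx, cy)), st.2.2 + 1)
    else st

def solution (dirs : String) : Int :=
  (dirs.toList.foldl solAStep ((0, 0), PySem.Set.empty, 0)).2.2

-- ===== PORT B =====
def deltaB (d : Char) : Option (Int × Int) :=
  PySem.Dict.get? (PySem.Dict.ofList [('U', ((1:Int), (0:Int))), ('D', (-1, 0)), ('R', (0, 1)), ('L', (0, -1))]) d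

-- tuple(sorted(e)) for a pair of Int pairs: exact two-element stable sort under Python's lexicographic tuple order
def canonEdge (e : (Int × Int) × (Int × Int)) : (Int × Int) × (Int × Int) :=
  if e.1.1 < e.2.1 ∨ (e.1.1 = e.2.1 ∧ e.1.2 ≤ e.2.2) then e else (e.2, e.1)

def solBStep (st : (Int × Int) × List (Int × Int)) (d : Char) : (Int × Int) × List (Int × Int) :=
  match deltaB d with
  | none => st  -- Python raises KeyError here; such inputs are outside Pre_solution
  | some (dx, dy) =>
    let nxt := (st.1.1 + dx, st.1.2 + dy)
    if -5 ≤ nxt.1 ∧ nxt.1 ≤ 5 ∧ -5 ≤ nxt.2 ∧ nxt.2 ≤ 5 then (nxt, st.2 ++ [nxt]) else st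

def solution_alt (dirs : String) : Int :=
  let pts := (dirs.toList.foldl solBStep ((0, 0), [(0, 0)])).2
  PySem.Set.len (PySem.Set.ofList ((pts.zip pts.tail).map canonEdge))

-- ===== PRECONDITION & SPEC =====
-- Pre_ excludes strings containing a character other than U, D, R or L: there Python A raises TypeError (unpacking None).
def Pre_solution (dirs : String) : Prop :=
  (dirs.toList.all fun c => c == 'U' || c == 'D' || c == 'R' || c == 'L') = true
instance (dirs : String) : Decidable (Pre_solution dirs) := by unfold Pre_solution; infer_instance
def pvWitness_solution : String := "URD"

def Spec_solution (dirs : String) (out : Int) : Prop := out = solution_alt dirs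
instance (dirs : String) (out : Int) : Decidable (Spec_solution dirs out) := by unfold Spec_solution; infer_instance

-- ===== CLAIM (what is proved, stated in full; the proofs are below) =====
def Claim_equal_solution : Prop := ∀ (dirs : String), Dom_solution dirs → Pre_solution dirs → Spec_solution dirs (solution dirs)

-- ===== LEMMAS AND PROOFS =====

def swapE (e : (Int × Int) × (Int × Int)) : (Int × Int) × (Int × Int) := (e.2, e.1)

lemma canon_cases (e : (Int × Int) × (Int × Int)) : canonEdge e = e ∨ canonEdge e = swapE e := by
  unfold canonEdge swapE; split_ifs <;> simp

lemma canon_swap (e : (Int × Int) × (Int × Int)) : canonEdge (swapE e) = canonEdge e := by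
  obtain ⟨⟨a, b⟩, ⟨c, d⟩⟩ := e
  unfold canonEdge swapE
  split_ifs <;> simp_all [Prod.ext_iff] <;> omega

lemma swap_swap (e : (Int × Int) × (Int × Int)) : swapE (swapE e) = e := rfl

lemma canon_eq_iff (f e : (Int × Int) × (Int × Int)) :
    canonEdge f = canonEdge e ↔ f = e ∨ f = swapE e := by
  constructor
  · intro h
    rcases canon_cases f with hf | hf <;> rcases canon_cases e with he | he
    · left; rw [← hf, h, he]
    · right; rw [← hf, h, he]
    · right
      have h2 : swapE f = e := by rw [← hf, h, he]
      rw [← h2, swap_swap]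
    · left
      have h2 := congrArg swapE (show swapE f = swapE e by rw [← hf, h, he])
      rwa [swap_swap, swap_swap] at h2
  · rintro (rfl | rfl)
    · rfl
    · exact canon_swap e

def edgesOf (pts : List (Int × Int)) : List ((Int × Int) × (Int × Int)) :=
  (pts.zip pts.tail).map canonEdge

lemma zip_tail_append (l : List (Int × Int)) (a n : Int × Int) (h : l.getLast? = some a) :
    (l ++ [n]).zip (l ++ [n]).tail = l.zip l.tail ++ [(a, n)] := by
  induction l with
  | nil => simp at h
  | cons x t ih =>
    cases t with
    | nil => simp_all
    | cons y t' =>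
      have h' : (y :: t').getLast? = some a := by rwa [List.getLast?_cons_cons] at h
      have hstep := ih h'
      simp only [List.cons_append, List.tail_cons] at hstep ⊢
      simp only [List.zip_cons_cons, hstep, List.cons_append]

lemma edgesOf_append (pts : List (Int × Int)) (a n : Int × Int) (h : pts.getLast? = some a) :
    edgesOf (pts ++ [n]) = edgesOf pts ++ [canonEdge (a, n)] := by
  unfold edgesOf
  rw [zip_tail_append pts a n h, List.map_append, List.map_singleton]

lemma len_add_mem {s : PySem.Set ((Int × Int) × (Int × Int))} {x} (h : x ∈ s) :
    PySem.Set.len (s.add x) = PySem.Set.len s := by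
  rw [PySem.Set.add_of_mem h]

lemma len_add_not_mem {s : PySem.Set ((Int × Int) × (Int × Int))} {x} (h : x ∉ s) :
    PySem.Set.len (s.add x) = PySem.Set.len s + 1 := by
  rw [PySem.Set.add_of_not_mem h]
  simp [PySem.Set.len]

lemma loop_inv (l : List Char) (cur : Int × Int) (visited : PySem.Set ((Int × Int) × (Int × Int)))
    (path : Int) (pts : List (Int × Int))
    (Hcur : pts.getLast? = some cur)
    (Hmem : ∀ f, f ∈ visited ↔ canonEdge f ∈ edgesOf pts)
    (Hpath : path = PySem.Set.len (PySem.Set.ofList (edgesOf pts))) :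
    (l.foldl solAStep (cur, visited, path)).2.2
      = PySem.Set.len (PySem.Set.ofList (edgesOf (l.foldl solBStep (cur, pts)).2)) := by
  induction l generalizing cur visited path pts with
  | nil => simpa using Hpath
  | cons d t ih =>
    simp only [List.foldl_cons]
    show (t.foldl solAStep (solAStep (cur, visited, path) d)).2.2 = _
    unfold solAStep solBStep
    have hmv : deltaB d = moveA d := rfl
    rw [hmv]
    cases hm : moveA d with
    | none => exact ih cur visited path pts Hcur Hmem Hpath
    | some dd =>
      obtain ⟨dx, dy⟩ := dd
      simp only
      set nxt : Int × Int := (cur.1 + dx, cur.2 + dy) with hnxt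
      by_cases hb : -5 ≤ cur.1 + dx ∧ cur.1 + dx ≤ 5 ∧ -5 ≤ cur.2 + dy ∧ cur.2 + dy ≤ 5
      · rw [if_pos hb, if_pos hb]
        have hE : edgesOf (pts ++ [nxt]) = edgesOf pts ++ [canonEdge (cur, nxt)] := by
          apply edgesOf_append _ _ _ Hcur
        have hcur' : (pts ++ [nxt]).getLast? = some nxt := by simp
        have hswap : canonEdge (nxt, cur) = canonEdge (cur, nxt) := canon_swap (cur, nxt)
        have hofl : PySem.Set.ofList (edgesOf (pts ++ [nxt]))
            = (PySem.Set.ofList (edgesOf pts)).add (canonEdge (cur, nxt)) := by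
          rw [hE, PySem.Set.ofList_append_singleton]
        have hmem' : ∀ f, f ∈ visited ∨ f = (cur, nxt) ∨ f = (nxt, cur)
            ↔ canonEdge f ∈ edgesOf (pts ++ [nxt]) := by
          intro f
          rw [hE, List.mem_append, List.mem_singleton, ← Hmem f]
          constructor
          · rintro (h | rfl | rfl)
            · exact Or.inl h
            · exact Or.inr rfl
            · exact Or.inr hswap
          · rintro (h | h)
            · exact Or.inl h
            · rcases (canon_eq_iff f (cur, nxt)).mp h with rfl | rfl
              · exact Or.inr (Or.inl rfl)
              · exact Or.inr (Or.inr rfl)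
        by_cases hv : ((cur.1, cur.2), (cur.1 + dx, cur.2 + dy)) ∈ visited
        · rw [if_pos hv]
          have hcE : canonEdge (cur, nxt) ∈ edgesOf pts := (Hmem _).mp hv
          refine ih nxt visited path (pts ++ [nxt]) hcur' ?_ ?_
          · intro f
            rw [← hmem' f]
            constructor
            · exact Or.inl
            · rintro (h | rfl | rfl)
              · exact h
              · exact hv
              · exact (Hmem _).mpr (hswap ▸ hcE)
          · rw [hofl, len_add_mem ((PySem.Set.mem_ofList _ _).mpr hcE)]
            exact Hpath
        · rw [if_neg hv]
          have hcE : canonEdge (cur, nxt) ∉ edgesOf pts := fun h => hv ((Hmem _).mpr h)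
          refine ih nxt _ (path + 1) (pts ++ [nxt]) hcur' ?_ ?_
          · intro f
            rw [PySem.Set.mem_add, PySem.Set.mem_add, ← hmem' f]
            tauto
          · rw [hofl, len_add_not_mem (fun h => hcE ((PySem.Set.mem_ofList _ _).mp h)), ← Hpath]
      · rw [if_neg hb, if_neg hb]
        exact ih cur visited path pts Hcur Hmem Hpath

-- ===== VERDICT (by name: the statement is the Claim_ definition above) =====
theorem solution_spec : Claim_equal_solution := by
  intro dirs _ _
  show solution dirs = solution_alt dirs
  unfold solution solution_alt
  exact loop_inv dirs.toList (0, 0) PySem.Set.empty 0 [(0, 0)] rfl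
    (by intro f; simp [PySem.Set.empty, edgesOf]) rfl
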